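-- pv_equiv track=rewrite | github.com/jeatog/traxo | traxo-micros/app/ocr.py | _buscar_banco_en_texto
-- ===== SOURCE A (Python) =====
-- def _buscar_banco_en_texto(texto: str, bancos: list[str]) -> str | None:
--     """
--     Devuelve el nombre normalizado del banco si encuentra una coincidencia en el texto;
--     None si no hay match. A diferencia de _normalizar_banco, no hace fallback al texto
--     original para evitar falsos positivos.
--     """
--     if not bancos:
--         return None
--     texto_up = texto.upper()
--     for banco in bancos:
--         banco_up = banco.upper()
--         if banco_up in texto_up or texto_up in banco_up:
--             return banco
--     for banco in bancos:
--         palabras = [p for p in banco.upper().split() if len(p) >= 4]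
--         if any(p in texto_up for p in palabras):
--             return banco
--     return None
-- ===== SOURCE B (Python) =====
-- def _buscar_banco_en_texto(texto: str, bancos: list[str]) -> str | None:
--     """Single pass: track first whole-name match and first long-word match separately."""
--     texto_up = texto.upper()
--     first_whole = None
--     first_word = None
--     for banco in bancos:
--         banco_up = banco.upper()
--         if first_whole is None and (banco_up in texto_up or texto_up in banco_up):
--             first_whole = banco
--         if first_word is None and any(
--             len(p) >= 4 and p in texto_up for p in banco_up.split()
--         ):
--             first_word = banco
--     return first_whole if first_whole is not None else first_word
-- ===== Notes on version B (the rewrite author's own statement) =====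
-- stated objective: alternative
-- what changed: Replaces A's two sequential scans of bancos (whole-match scan, then word-match scan) by a single traversal maintaining two accumulators (first whole-name match, first long-word match) combined after the loop.
import Mathlib
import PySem

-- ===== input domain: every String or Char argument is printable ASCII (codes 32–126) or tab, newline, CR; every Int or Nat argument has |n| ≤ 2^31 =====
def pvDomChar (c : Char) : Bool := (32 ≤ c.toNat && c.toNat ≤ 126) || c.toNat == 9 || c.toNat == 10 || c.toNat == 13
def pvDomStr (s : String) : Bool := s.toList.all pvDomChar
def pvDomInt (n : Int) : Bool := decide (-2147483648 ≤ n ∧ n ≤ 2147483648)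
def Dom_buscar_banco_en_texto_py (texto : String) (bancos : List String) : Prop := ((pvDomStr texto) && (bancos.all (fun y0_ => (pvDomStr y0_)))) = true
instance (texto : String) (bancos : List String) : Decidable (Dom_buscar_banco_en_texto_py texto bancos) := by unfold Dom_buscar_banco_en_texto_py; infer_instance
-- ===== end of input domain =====

-- B: one pass with two accumulators instead of A's two sequential scans; return value only.
-- ===== PORT A =====
def pvA_loop1 (texto_up : String) : List String → Option String
  | [] => none
  | banco :: rest =>
      let banco_up := PySem.Str.upper banco
      if PySem.Str.isIn banco_up texto_up || PySem.Str.isIn texto_up banco_up then some banco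
      else pvA_loop1 texto_up rest

def pvA_loop2 (texto_up : String) : List String → Option String
  | [] => none
  | banco :: rest =>
      let palabras := (PySem.Str.split₀ (PySem.Str.upper banco)).filter
        (fun p => decide (4 ≤ PySem.Str.len p))
      if palabras.any (fun p => PySem.Str.isIn p texto_up) then some banco
      else pvA_loop2 texto_up rest

def buscar_banco_en_texto_py (texto : String) (bancos : List String) : Option String :=
  if bancos = [] then none
  else
    let texto_up := PySem.Str.upper texto
    match pvA_loop1 texto_up bancos with
    | some b => some b
    | none => pvA_loop2 texto_up bancos

-- ===== PORT B =====
def pvB_step (texto_up : String) (st : Option String × Option String) (banco : String) :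
    Option String × Option String :=
  let banco_up := PySem.Str.upper banco
  let first_whole :=
    if st.1.isNone && (PySem.Str.isIn banco_up texto_up || PySem.Str.isIn texto_up banco_up)
    then some banco else st.1
  let first_word :=
    if st.2.isNone && (PySem.Str.split₀ banco_up).any
        (fun p => decide (4 ≤ PySem.Str.len p) && PySem.Str.isIn p texto_up)
    then some banco else st.2
  (first_whole, first_word)

def buscar_banco_en_texto_py_alt (texto : String) (bancos : List String) : Option String :=
  let texto_up := PySem.Str.upper texto
  let st := bancos.foldl (pvB_step texto_up) (none, none)
  match st.1 with
  | some b => some b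
  | none => st.2

-- ===== PRECONDITION & SPEC =====
def Spec_buscar_banco_en_texto_py (texto : String) (bancos : List String) (out : Option String) : Prop := out = buscar_banco_en_texto_py_alt texto bancos
instance (texto : String) (bancos : List String) (out : Option String) : Decidable (Spec_buscar_banco_en_texto_py texto bancos out) := by unfold Spec_buscar_banco_en_texto_py; infer_instance

-- ===== CLAIM (what is proved, stated in full; the proofs are below) =====
def Claim_equal_buscar_banco_en_texto_py : Prop := ∀ (texto : String) (bancos : List String), Dom_buscar_banco_en_texto_py texto bancos → Spec_buscar_banco_en_texto_py texto bancos (buscar_banco_en_texto_py texto bancos)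

-- ===== LEMMAS AND PROOFS =====

lemma pvB_foldl_eq (t : String) : ∀ (bs : List String) (o1 o2 : Option String),
    bs.foldl (pvB_step t) (o1, o2) = (o1.or (pvA_loop1 t bs), o2.or (pvA_loop2 t bs)) := by
  intro bs
  induction bs with
  | nil => intro o1 o2; simp [pvA_loop1, pvA_loop2]
  | cons b rest ih =>
      intro o1 o2
      simp only [List.foldl_cons, pvB_step]
      cases o1 <;> cases o2 <;>
        simp [ih, pvA_loop1, pvA_loop2, List.any_filter, Option.or] <;>
        split_ifs <;> simp_all [Option.or]

-- ===== VERDICT (by name: the statement is the Claim_ definition above) =====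
theorem buscar_banco_en_texto_py_spec : Claim_equal_buscar_banco_en_texto_py := by
  intro texto bancos _
  unfold Spec_buscar_banco_en_texto_py buscar_banco_en_texto_py buscar_banco_en_texto_py_alt
  cases bancos with
  | nil => simp
  | cons b bs =>
      simp only [pvB_foldl_eq, Option.or]
      cases pvA_loop1 (PySem.Str.upper texto) (b :: bs) <;> simp
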